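-- pv_equiv track=rewrite | github.com/zerlinshen/singlecell_factory | workflow/modular/modules/rna_velocity.py | _build_exon_lookup
-- ===== SOURCE A (Python) =====
-- from collections import defaultdict
--
-- def _build_exon_lookup(
--     exons: dict[str, list[tuple[str, int, int]]],
-- ) -> dict[str, dict[str, list[tuple[int, int]]]]:
--     """Build {chrom: {gene: [(start, end), ...]}} for fast lookup."""
--     lookup: dict[str, dict[str, list[tuple[int, int]]]] = defaultdict(
--         lambda: defaultdict(list)
--     )
--     for gene, intervals in exons.items():
--         for chrom, start, end in intervals:
--             lookup[chrom][gene].append((start, end))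
--     for chrom in lookup:
--         for gene in lookup[chrom]:
--             lookup[chrom][gene].sort()
--     return {chrom: dict(genes) for chrom, genes in lookup.items()}
-- ===== SOURCE B (Python) =====
-- def _build_exon_lookup(
--     exons: dict[str, list[tuple[str, int, int]]],
-- ) -> dict[str, dict[str, list[tuple[int, int]]]]:
--     """Build {chrom: {gene: [(start, end), ...]}} for fast lookup."""
--     lookup: dict[str, dict[str, list[tuple[int, int]]]] = {}
--     records: list[tuple[int, int, str, str]] = []
--     for gene, intervals in exons.items():
--         for chrom, start, end in intervals:
--             lookup.setdefault(chrom, {}).setdefault(gene, [])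
--             records.append((start, end, chrom, gene))
--     records.sort(key=lambda r: (r[0], r[1]))
--     for start, end, chrom, gene in records:
--         lookup[chrom][gene].append((start, end))
--     return lookup
-- ===== Notes on version B (the rewrite author's own statement) =====
-- stated objective: alternative
-- what changed: B flattens the exon dict into (start, end, chrom, gene) records in one pass while pre-registering the nested dict keys with setdefault, then does ONE global stable sort of the records and appends them in sorted order, eliminating A's per-gene list.sort() passes.
import Mathlib
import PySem

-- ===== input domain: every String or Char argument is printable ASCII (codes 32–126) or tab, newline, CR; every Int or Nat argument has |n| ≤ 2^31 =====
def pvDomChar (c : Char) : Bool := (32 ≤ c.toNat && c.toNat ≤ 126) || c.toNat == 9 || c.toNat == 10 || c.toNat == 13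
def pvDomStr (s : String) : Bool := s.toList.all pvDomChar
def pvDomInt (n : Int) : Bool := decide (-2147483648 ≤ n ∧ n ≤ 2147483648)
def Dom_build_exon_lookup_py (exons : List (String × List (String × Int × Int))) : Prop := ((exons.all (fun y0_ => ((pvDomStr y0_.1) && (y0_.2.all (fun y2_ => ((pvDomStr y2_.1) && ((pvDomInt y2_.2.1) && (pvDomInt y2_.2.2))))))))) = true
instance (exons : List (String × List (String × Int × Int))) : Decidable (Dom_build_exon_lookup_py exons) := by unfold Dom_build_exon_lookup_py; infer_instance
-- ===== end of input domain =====

-- B replaces A's per-gene list.sort() passes by one global stable sort of the flattened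
-- (start, end, chrom, gene) records, appended into a pre-registered nested dict skeleton
-- (objective: alternative decomposition; same observable return value).

-- ===== PORT A =====
def build_exon_lookup_py (exons : List (String × List (String × Int × Int))) : List (String × List (String × List (Int × Int))) :=
  -- lookup = defaultdict(lambda: defaultdict(list)); nested append loop
  let lookup : PySem.Dict String (PySem.Dict String (List (Int × Int))) :=
    exons.foldl (fun lk gi =>
      gi.2.foldl (fun lk cse =>
        lk.modify cse.1 PySem.Dict.empty (fun gd => gd.modify gi.1 [] (fun l => l ++ [(cse.2.1, cse.2.2)]))) lk)
      PySem.Dict.empty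
  -- in-place sort pass: lookup[chrom][gene].sort()  (Python's tuple sort = sorted2 on (fst, snd))
  let lookup2 : PySem.Dict String (PySem.Dict String (List (Int × Int))) :=
    PySem.Dict.mk (lookup.items.map (fun cg =>
      (cg.1, PySem.Dict.mk (cg.2.items.map (fun gl =>
        (gl.1, PySem.List.sorted2 gl.2 (fun p => p.1) (fun p => p.2)))))))
  -- {chrom: dict(genes) for chrom, genes in lookup.items()}
  lookup2.items.map (fun cg => (cg.1, cg.2.items))

-- ===== PORT B =====
def build_exon_lookup_py_alt (exons : List (String × List (String × Int × Int))) : List (String × List (String × List (Int × Int))) :=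
  -- one pass: register keys via setdefault and flatten to (start, end, chrom, gene) records
  let st : PySem.Dict String (PySem.Dict String (List (Int × Int))) × List (Int × Int × String × String) :=
    exons.foldl (fun st gi =>
      gi.2.foldl (fun st cse =>
        (st.1.modify cse.1 PySem.Dict.empty (fun gd => gd.setdefault gi.1 []),
         st.2 ++ [(cse.2.1, cse.2.2, cse.1, gi.1)])) st)
      (PySem.Dict.empty, [])
  -- records.sort(key=lambda r: (r[0], r[1]))  — one global stable sort
  let records := PySem.List.sorted2 st.2 (fun r => r.1) (fun r => r.2.1)
  -- second pass: append each record under its (chrom, gene) slot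
  let lookup : PySem.Dict String (PySem.Dict String (List (Int × Int))) :=
    records.foldl (fun lk r =>
      lk.modify r.2.2.1 PySem.Dict.empty (fun gd => gd.modify r.2.2.2 [] (fun l => l ++ [(r.1, r.2.1)]))) st.1
  lookup.items.map (fun cg => (cg.1, cg.2.items))

-- ===== PRECONDITION & SPEC =====
def Spec_build_exon_lookup_py (exons : List (String × List (String × Int × Int))) (out : List (String × List (String × List (Int × Int)))) : Prop := out = build_exon_lookup_py_alt exons
instance (exons : List (String × List (String × Int × Int))) (out : List (String × List (String × List (Int × Int)))) : Decidable (Spec_build_exon_lookup_py exons out) := by unfold Spec_build_exon_lookup_py; infer_instance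

-- ===== CLAIM (what is proved, stated in full; the proofs are below) =====
def Claim_equal_build_exon_lookup_py : Prop := ∀ (exons : List (String × List (String × Int × Int))), Dom_build_exon_lookup_py exons → Spec_build_exon_lookup_py exons (build_exon_lookup_py exons)

-- ===== LEMMAS AND PROOFS =====

-- getD of a fold of modify keyed by `key`, default d0
theorem pv_getD_foldl_modify {ν β : Type} (l : List β) (key : β → String) (d0 : ν)
    (f : β → ν → ν) (d : PySem.Dict String ν) (c : String) :
    (l.foldl (fun d x => PySem.Dict.modify d (key x) d0 (f x)) d).getD c d0
      = (l.filter (fun x => key x == c)).foldl (fun v x => f x v) (d.getD c d0) := by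
  induction l generalizing d with
  | nil => rfl
  | cons x t ih =>
    simp only [List.foldl_cons, List.filter_cons]
    rw [ih]
    by_cases h : key x = c
    · simp [h]
    · simp [h, PySem.Dict.getD_modify, Ne.symm h]

theorem pv_getD_foldl_setdefault {ν β : Type} (l : List β) (key : β → String) (v0 : ν)
    (d : PySem.Dict String ν) (g : String) :
    (l.foldl (fun gd x => PySem.Dict.setdefault gd (key x) v0) d).getD g v0 = d.getD g v0 := by
  induction l generalizing d with
  | nil => rfl
  | cons x t ih =>
    simp only [List.foldl_cons]
    rw [ih]
    by_cases hc : d.contains (key x) = true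
    · rw [PySem.Dict.setdefault_of_contains _ _ hc]
    · rw [PySem.Dict.setdefault_of_not_contains _ _ (by simpa using hc)]
      rw [PySem.Dict.getD_insert]
      split_ifs with h
      · subst h; exact (PySem.Dict.getD_of_not_contains d v0 (by simpa using hc)).symm
      · rfl

theorem pv_keys_setdefault {ν : Type} (d : PySem.Dict String ν) (k : String) (v0 : ν) :
    (PySem.Dict.setdefault d k v0).keys = PySem.Set.add d.keys k := by
  by_cases hc : d.contains k = true
  · rw [PySem.Dict.setdefault_of_contains _ _ hc]
    have hk : k ∈ d.keys := by
      rw [PySem.Dict.contains_eq_decide_mem_keys] at hc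
      simpa using hc
    simp [PySem.Set.add, hk]
  · have hk : k ∉ d.keys := by
      rw [PySem.Dict.contains_eq_decide_mem_keys] at hc
      simpa using hc
    rw [PySem.Dict.setdefault_of_not_contains _ _ (by simpa using hc)]
    rw [PySem.Dict.keys_insert_of_not_contains _ _ (by simpa using hc)]
    simp [PySem.Set.add, hk]

theorem pv_keys_foldl_setdefault {ν β : Type} (l : List β) (key : β → String) (v0 : ν)
    (d : PySem.Dict String ν) :
    (l.foldl (fun gd x => PySem.Dict.setdefault gd (key x) v0) d).keys
      = PySem.Set.update d.keys (l.map key) := by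
  induction l generalizing d with
  | nil => rfl
  | cons x t ih =>
    simp only [List.foldl_cons, List.map_cons]
    rw [ih, pv_keys_setdefault]
    rfl

theorem pv_set_update_eq_self (s : PySem.Set String) (l : List String)
    (h : ∀ x ∈ l, x ∈ s) : PySem.Set.update s l = s := by
  induction l with
  | nil => rfl
  | cons x t ih =>
    have hx : PySem.Set.contains s x = true := by
      simpa [PySem.Set.contains, List.contains_iff_mem] using h x (by simp)
    show PySem.Set.update (PySem.Set.add s x) t = s
    rw [PySem.Set.add, if_pos hx]
    exact ih (fun y hy => h y (by simp [hy]))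

theorem pv_sorted2_lex {α : Type} (xs : List α) (k1 k2 : α → Int) :
    PySem.List.sorted2 xs k1 k2 = PySem.List.sorted xs (fun a => toLex (k1 a, k2 a)) := by
  have hb : (fun a b : α => decide (k1 a < k1 b) || (!decide (k1 b < k1 a) && decide (k2 a < k2 b)))
      = (fun a b : α => decide (toLex (k1 a, k2 a) < toLex (k1 b, k2 b))) := by
    funext a b
    by_cases h1 : k1 a < k1 b <;> by_cases h2 : k1 b < k1 a <;> by_cases h3 : k2 a < k2 b <;>
      simp [Prod.Lex.lt_iff, h1, h2, h3] <;> omega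
  simp only [PySem.List.sorted2, PySem.List.sorted, if_neg (by decide : ¬(false = true))]
  rw [hb]

theorem pv_group_sorted (l : List (Int × Int × String × String))
    (pc pg : (Int × Int × String × String) → Bool) :
    PySem.List.sorted2 (((l.filter pc).filter pg).map (fun r => (r.1, r.2.1)))
        (fun p => p.1) (fun p => p.2)
      = (((PySem.List.sorted2 l (fun r => r.1) (fun r => r.2.1)).filter pc).filter pg).map
          (fun r => (r.1, r.2.1)) := by
  apply PySem.List.eq_of_perm_of_pairwise_le_of_injective (key := fun p : Int × Int => toLex p)
    toLex.injective
  · refine ((PySem.List.sorted2_perm _ _ _ _).trans ?_).trans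
      ((((PySem.List.sorted2_perm l _ _ false).filter pc).filter pg).map _).symm
    exact List.Perm.refl _
  · rw [pv_sorted2_lex]
    exact PySem.List.sorted_pairwise _ _
  · rw [pv_sorted2_lex]
    have hp := PySem.List.sorted_pairwise l (fun r => toLex (r.1, r.2.1))
    have hp2 := hp.sublist (List.Sublist.trans (List.filter_sublist (p := pg))
      (List.filter_sublist (p := pc) (l := PySem.List.sorted l (fun r => toLex (r.1, r.2.1)))))
    exact List.Pairwise.map _ (fun a b h => h) hp2

theorem pv_update_nil (xs : List String) : PySem.Set.update [] xs = PySem.Set.ofList xs := by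
  rw [PySem.Set.ofList_eq_foldl]; rfl

-- items of the inner modify-append fold (grouping by gene)
theorem pv_inner_items (m : List (Int × Int × String × String))
    (d : PySem.Dict String (List (Int × Int))) (hnd : d.keys.Nodup) :
    (m.foldl (fun gd r => PySem.Dict.modify gd r.2.2.2 [] (fun v => v ++ [(r.1, r.2.1)])) d).items
      = (PySem.Set.update d.keys (m.map (fun r => r.2.2.2))).map (fun g =>
          (g, d.getD g [] ++ ((m.filter (fun r => r.2.2.2 == g)).map (fun r => (r.1, r.2.1))))) := by
  rw [PySem.Dict.items_eq_map_keys _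
    (PySem.Dict.nodup_keys_foldl_modify_key m (fun r => r.2.2.2) []
      (fun _ r => fun v => v ++ [(r.1, r.2.1)]) d hnd) []]
  rw [PySem.Dict.keys_foldl_modify_key m (fun r => r.2.2.2) []
      (fun _ r => fun v => v ++ [(r.1, r.2.1)]) d]
  refine List.map_congr_left (fun g _ => ?_)
  congr 1
  rw [pv_getD_foldl_modify m (fun r => r.2.2.2) []
      (fun r v => v ++ [(r.1, r.2.1)]) d g]
  rw [PySem.List.foldl_append_singleton_eq_map]

-- items of the outer modify fold (grouping by chrom), generic inner step
theorem pv_outer_items {β : Type} (l : List (Int × Int × String × String))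
    (f : (Int × Int × String × String) → PySem.Dict String β → PySem.Dict String β)
    (d : PySem.Dict String (PySem.Dict String β)) (hnd : d.keys.Nodup) :
    (l.foldl (fun lk r => PySem.Dict.modify lk r.2.2.1 PySem.Dict.empty (f r)) d).items
      = (PySem.Set.update d.keys (l.map (fun r => r.2.2.1))).map (fun c =>
          (c, (l.filter (fun r => r.2.2.1 == c)).foldl (fun gd r => f r gd)
                (d.getD c PySem.Dict.empty))) := by
  rw [PySem.Dict.items_eq_map_keys _
    (PySem.Dict.nodup_keys_foldl_modify_key l (fun r => r.2.2.1) PySem.Dict.empty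
      (fun _ r => f r) d hnd) PySem.Dict.empty]
  rw [PySem.Dict.keys_foldl_modify_key l (fun r => r.2.2.1) PySem.Dict.empty
      (fun _ r => f r) d]
  refine List.map_congr_left (fun c _ => ?_)
  congr 1
  rw [pv_getD_foldl_modify l (fun r => r.2.2.1) PySem.Dict.empty f d c]
-- The flattened record list (start, end, chrom, gene), in A's scan order.
def pvRecs (exons : List (String × List (String × Int × Int))) : List (Int × Int × String × String) :=
  exons.flatMap (fun gi => gi.2.map (fun cse => (cse.2.1, cse.2.2, cse.1, gi.1)))

-- canonical forms of the two outputs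
def pvCanonA (exons : List (String × List (String × Int × Int))) : List (String × List (String × List (Int × Int))) :=
  (PySem.Set.ofList ((pvRecs exons).map (fun r => r.2.2.1))).map (fun c =>
    (c, (PySem.Set.ofList (((pvRecs exons).filter (fun r => r.2.2.1 == c)).map (fun r => r.2.2.2))).map (fun g =>
      (g, PySem.List.sorted2 ((((pvRecs exons).filter (fun r => r.2.2.1 == c)).filter (fun r => r.2.2.2 == g)).map (fun r => (r.1, r.2.1))) (fun p => p.1) (fun p => p.2)))))

def pvCanonB (exons : List (String × List (String × Int × Int))) : List (String × List (String × List (Int × Int))) :=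
  (PySem.Set.ofList ((pvRecs exons).map (fun r => r.2.2.1))).map (fun c =>
    (c, (PySem.Set.ofList (((pvRecs exons).filter (fun r => r.2.2.1 == c)).map (fun r => r.2.2.2))).map (fun g =>
      (g, ((((PySem.List.sorted2 (pvRecs exons) (fun r => r.1) (fun r => r.2.1)).filter (fun r => r.2.2.1 == c)).filter (fun r => r.2.2.2 == g)).map (fun r => (r.1, r.2.1)))))))

theorem pvA_flat (exons : List (String × List (String × Int × Int))) :
    (exons.foldl (fun lk gi =>
      gi.2.foldl (fun lk cse =>
        PySem.Dict.modify lk cse.1 PySem.Dict.empty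
          (fun gd => PySem.Dict.modify gd gi.1 [] (fun l => l ++ [(cse.2.1, cse.2.2)]))) lk)
      PySem.Dict.empty)
    = ((pvRecs exons).foldl (fun lk r =>
        PySem.Dict.modify lk r.2.2.1 PySem.Dict.empty
          (fun gd => PySem.Dict.modify gd r.2.2.2 [] (fun v => v ++ [(r.1, r.2.1)])))
        PySem.Dict.empty) := by
  rw [pvRecs, List.foldl_flatMap]
  simp only [List.foldl_map]

theorem pvA_eq_canon (exons : List (String × List (String × Int × Int))) :
    build_exon_lookup_py exons = pvCanonA exons := by
  simp only [build_exon_lookup_py]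
  rw [pvA_flat]
  rw [pv_outer_items (pvRecs exons)
      (fun r => fun gd => PySem.Dict.modify gd r.2.2.2 [] (fun v => v ++ [(r.1, r.2.1)]))
      PySem.Dict.empty (by simp [PySem.Dict.keys_empty])]
  simp only [List.map_map, PySem.Dict.keys_empty, pv_update_nil, PySem.Dict.getD_empty]
  rw [pvCanonA]
  refine List.map_congr_left (fun c _ => ?_)
  simp only [Function.comp_apply]
  refine congrArg (Prod.mk c) ?_
  show (List.map _ ((List.foldl (fun gd r => PySem.Dict.modify gd r.2.2.2 []
      (fun v => v ++ [(r.1, r.2.1)])) PySem.Dict.empty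
      (List.filter (fun r => r.2.2.1 == c) (pvRecs exons))).items)) = _
  rw [pv_inner_items _ PySem.Dict.empty (by simp [PySem.Dict.keys_empty])]
  simp only [List.map_map, PySem.Dict.keys_empty, pv_update_nil,
    PySem.Dict.getD_empty, List.nil_append]
  exact List.map_congr_left (fun g _ => rfl)

theorem pvB_flat (exons : List (String × List (String × Int × Int))) :
    (exons.foldl (fun st gi =>
      gi.2.foldl (fun st cse =>
        (PySem.Dict.modify st.1 cse.1 PySem.Dict.empty
            (fun gd => PySem.Dict.setdefault gd gi.1 []),
         st.2 ++ [(cse.2.1, cse.2.2, cse.1, gi.1)])) st)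
      ((PySem.Dict.empty : PySem.Dict String (PySem.Dict String (List (Int × Int)))), []))
    = ((pvRecs exons).foldl (fun lk r =>
         PySem.Dict.modify lk r.2.2.1 PySem.Dict.empty
           (fun gd => PySem.Dict.setdefault gd r.2.2.2 [])) PySem.Dict.empty,
       pvRecs exons) := by
  have h1 : (exons.foldl (fun st gi =>
      gi.2.foldl (fun st cse =>
        (PySem.Dict.modify st.1 cse.1 PySem.Dict.empty
            (fun gd => PySem.Dict.setdefault gd gi.1 []),
         st.2 ++ [(cse.2.1, cse.2.2, cse.1, gi.1)])) st)
      ((PySem.Dict.empty : PySem.Dict String (PySem.Dict String (List (Int × Int)))), []))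
    = ((pvRecs exons).foldl (fun st r =>
        (PySem.Dict.modify st.1 r.2.2.1 PySem.Dict.empty
            (fun gd => PySem.Dict.setdefault gd r.2.2.2 []),
         st.2 ++ [r])) (PySem.Dict.empty, [])) := by
    rw [pvRecs, List.foldl_flatMap]
    simp only [List.foldl_map]
  rw [h1]
  rw [PySem.List.foldl_prod_mk
    (f := fun lk (r : Int × Int × String × String) =>
      PySem.Dict.modify lk r.2.2.1 PySem.Dict.empty
        (fun gd => PySem.Dict.setdefault gd r.2.2.2 []))
    (g := fun rs (r : Int × Int × String × String) => rs ++ [r])]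
  rw [PySem.List.foldl_append_singleton_eq_self]
  simp

-- B's skeleton pass: keys and per-chrom value
theorem pv_skel_keys (l : List (Int × Int × String × String)) :
    ((l.foldl (fun lk r => PySem.Dict.modify lk r.2.2.1 PySem.Dict.empty
        (fun gd => PySem.Dict.setdefault gd r.2.2.2 ([] : List (Int × Int))))
      PySem.Dict.empty) : PySem.Dict String (PySem.Dict String (List (Int × Int)))).keys
      = PySem.Set.ofList (l.map (fun r => r.2.2.1)) := by
  rw [PySem.Dict.keys_foldl_modify_key l (fun r => r.2.2.1) PySem.Dict.empty
    (fun _ r => fun gd => PySem.Dict.setdefault gd r.2.2.2 []) PySem.Dict.empty]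
  rw [PySem.Dict.keys_empty, pv_update_nil]

theorem pv_skel_getD (l : List (Int × Int × String × String)) (c : String) :
    ((l.foldl (fun lk r => PySem.Dict.modify lk r.2.2.1 PySem.Dict.empty
        (fun gd => PySem.Dict.setdefault gd r.2.2.2 ([] : List (Int × Int))))
      PySem.Dict.empty) : PySem.Dict String (PySem.Dict String (List (Int × Int)))).getD c PySem.Dict.empty
      = (l.filter (fun r => r.2.2.1 == c)).foldl
          (fun gd r => PySem.Dict.setdefault gd r.2.2.2 []) PySem.Dict.empty := by
  rw [pv_getD_foldl_modify l (fun r => r.2.2.1) PySem.Dict.empty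
    (fun r gd => PySem.Dict.setdefault gd r.2.2.2 []) PySem.Dict.empty c]
  rw [PySem.Dict.getD_empty]

theorem pv_skC_keys (m : List (Int × Int × String × String)) :
    ((m.foldl (fun gd r => PySem.Dict.setdefault gd r.2.2.2 ([] : List (Int × Int)))
      PySem.Dict.empty) : PySem.Dict String (List (Int × Int))).keys
      = PySem.Set.ofList (m.map (fun r => r.2.2.2)) := by
  rw [pv_keys_foldl_setdefault m (fun r => r.2.2.2) ([] : List (Int × Int)) PySem.Dict.empty]
  rw [PySem.Dict.keys_empty, pv_update_nil]

theorem pv_skC_getD (m : List (Int × Int × String × String)) (g : String) :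
    ((m.foldl (fun gd r => PySem.Dict.setdefault gd r.2.2.2 ([] : List (Int × Int)))
      PySem.Dict.empty) : PySem.Dict String (List (Int × Int))).getD g []
      = [] := by
  rw [pv_getD_foldl_setdefault m (fun r => r.2.2.2) ([] : List (Int × Int)) PySem.Dict.empty g]
  rw [PySem.Dict.getD_empty]

theorem pvB_eq_canon (exons : List (String × List (String × Int × Int))) :
    build_exon_lookup_py_alt exons = pvCanonB exons := by
  simp only [build_exon_lookup_py_alt]
  rw [pvB_flat]
  simp only
  have hperm : (PySem.List.sorted2 (pvRecs exons) (fun r => r.1) (fun r => r.2.1)).Perm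
      (pvRecs exons) := PySem.List.sorted2_perm _ _ _ _
  rw [pv_outer_items _ (fun r => fun gd =>
      PySem.Dict.modify gd r.2.2.2 [] (fun v => v ++ [(r.1, r.2.1)])) _
      (by rw [pv_skel_keys]; exact PySem.Set.nodup_ofList _)]
  rw [pv_skel_keys]
  rw [pv_set_update_eq_self _ _ (by
    intro x hx
    have : x ∈ (pvRecs exons).map (fun r => r.2.2.1) := (hperm.map _).mem_iff.mp hx
    simpa [PySem.Set.mem_ofList] using this)]
  rw [pvCanonB, List.map_map]
  refine List.map_congr_left (fun c _ => ?_)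
  simp only [Function.comp_apply]
  refine congrArg (Prod.mk c) ?_
  rw [pv_skel_getD]
  rw [pv_inner_items _ _ (by rw [pv_skC_keys]; exact PySem.Set.nodup_ofList _)]
  rw [pv_skC_keys]
  rw [pv_set_update_eq_self _ _ (by
    intro x hx
    have : x ∈ ((pvRecs exons).filter (fun r => r.2.2.1 == c)).map (fun r => r.2.2.2) :=
      ((hperm.filter _).map _).mem_iff.mp hx
    simpa [PySem.Set.mem_ofList] using this)]
  refine List.map_congr_left (fun g _ => ?_)
  refine congrArg (Prod.mk g) ?_
  rw [pv_skC_getD, List.nil_append]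

theorem pvCanon_eq (exons : List (String × List (String × Int × Int))) :
    pvCanonA exons = pvCanonB exons := by
  rw [pvCanonA, pvCanonB]
  refine List.map_congr_left (fun c _ => ?_)
  refine congrArg (Prod.mk c) ?_
  refine List.map_congr_left (fun g _ => ?_)
  refine congrArg (Prod.mk g) ?_
  exact pv_group_sorted (pvRecs exons) (fun r => r.2.2.1 == c) (fun r => r.2.2.2 == g)


-- ===== VERDICT (by name: the statement is the Claim_ definition above) =====
theorem build_exon_lookup_py_spec : Claim_equal_build_exon_lookup_py := by
  intro exons _
  unfold Spec_build_exon_lookup_py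
  rw [pvA_eq_canon, pvB_eq_canon, pvCanon_eq]
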